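-- pv_equiv track=rewrite | github.com/justjacobrosario/BS_Computer_Science_UPD_Repo | 1st Year 1st Sem/python test drive/useful_dictionaries/dict_grouping.py | group_by_sign
-- ===== SOURCE A (Python) =====
-- def group_by_sign(seq):
--     dic = {
--     'negative' : [],
--     'zero' : [],
--     'positive' : []
--     }
--     for num in seq:
--         if num == 0:
--             dic["zero"].append(num)
--         elif num > 0:
--             dic["positive"].append(num)
--         else:
--             dic["negative"].append(num)
--     return dic
-- ===== SOURCE B (Python) =====
-- def group_by_sign(seq):
--     seq = list(seq)
--     return {
--         'negative': [x for x in seq if x < 0],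
--         'zero': [x for x in seq if x == 0],
--         'positive': [x for x in seq if x > 0],
--     }
-- ===== Notes on version B (the rewrite author's own statement) =====
-- stated objective: idiomatic
-- what changed: Replaces the single pass with mutating if/elif/else branches by a dict literal of three independent filtering comprehensions.
import Mathlib
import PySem

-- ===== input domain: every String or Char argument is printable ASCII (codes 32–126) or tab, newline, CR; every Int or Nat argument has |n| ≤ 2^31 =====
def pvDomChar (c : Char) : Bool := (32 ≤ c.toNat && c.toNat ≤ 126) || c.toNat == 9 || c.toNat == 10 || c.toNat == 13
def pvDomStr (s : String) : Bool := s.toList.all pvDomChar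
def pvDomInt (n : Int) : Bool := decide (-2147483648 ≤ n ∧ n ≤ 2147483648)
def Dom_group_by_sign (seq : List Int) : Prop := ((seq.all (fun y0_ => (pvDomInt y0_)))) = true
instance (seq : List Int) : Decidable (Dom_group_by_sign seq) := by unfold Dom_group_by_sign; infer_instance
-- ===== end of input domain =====

-- B replaces A's single pass with mutating if/elif/else by a dict literal of three filtering comprehensions (idiomatic).


-- ===== PORT A =====
-- A keeps a dict with three fixed keys and appends to the matching list per element;
-- ported as a foldl over the three lists (the dict's fixed insertion order 'negative','zero','positive'),
-- assembled into the association list at the end.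
-- loop body: append num to the list matching its sign
def gbsStep (acc : List Int × List Int × List Int) (num : Int) : List Int × List Int × List Int :=
  if num == 0 then (acc.1, acc.2.1 ++ [num], acc.2.2)
  else if num > 0 then (acc.1, acc.2.1, acc.2.2 ++ [num])
  else (acc.1 ++ [num], acc.2.1, acc.2.2)

def group_by_sign (seq : List Int) : List (String × List Int) :=
  let st := seq.foldl gbsStep ([], [], [])
  [("negative", st.1), ("zero", st.2.1), ("positive", st.2.2)]

-- ===== PORT B =====
def group_by_sign_alt (seq : List Int) : List (String × List Int) :=
  [("negative", seq.filter (fun x => x < 0)),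
   ("zero", seq.filter (fun x => x == 0)),
   ("positive", seq.filter (fun x => x > 0))]

-- ===== PRECONDITION & SPEC =====
def Spec_group_by_sign (seq : List Int) (out : List (String × List Int)) : Prop := out = group_by_sign_alt seq
instance (seq : List Int) (out : List (String × List Int)) : Decidable (Spec_group_by_sign seq out) := by unfold Spec_group_by_sign; infer_instance

-- ===== CLAIM (what is proved, stated in full; the proofs are below) =====
def Claim_equal_group_by_sign : Prop := ∀ (seq : List Int), Dom_group_by_sign seq → Spec_group_by_sign seq (group_by_sign seq)

-- ===== LEMMAS AND PROOFS =====
theorem group_by_sign_fold (seq n z p : List Int) :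
    seq.foldl gbsStep (n, z, p)
    = (n ++ seq.filter (fun x => x < 0),
       z ++ seq.filter (fun x => x == 0),
       p ++ seq.filter (fun x => x > 0)) := by
  induction seq generalizing n z p with
  | nil => simp
  | cons a t ih =>
    rw [List.foldl_cons]
    by_cases h0 : a = 0
    · subst h0
      rw [show gbsStep (n, z, p) 0 = (n, z ++ [0], p) from rfl, ih]
      simp
    · by_cases hp : a > 0
      · have hn : ¬ a < 0 := by omega
        rw [show gbsStep (n, z, p) a = (n, z, p ++ [a]) from by
          simp [gbsStep, h0, hp], ih]
        simp [h0, hp, hn]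
      · have hn : a < 0 := by omega
        rw [show gbsStep (n, z, p) a = (n ++ [a], z, p) from by
          simp [gbsStep, h0, hp], ih]
        simp [h0, hp, hn]

-- ===== VERDICT (by name: the statement is the Claim_ definition above) =====
theorem group_by_sign_spec : Claim_equal_group_by_sign := by
  intro seq _
  unfold Spec_group_by_sign group_by_sign group_by_sign_alt
  rw [group_by_sign_fold]
  simp
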